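-- pv_equiv track=rewrite | github.com/2025-1-analitica-descriptiva/LAB-01-programacion-basica-en-python-sanbedoyau | homework/utils.py | mapper05
-- ===== SOURCE A (Python) =====
-- def mapper05(sequence: list):
--     min: dict = {}
--     max: dict = {}
--     for line in sequence:
--         if (line[0] not in min.keys()) or (line[0] not in max.keys()):
--             max[line[0]] = int(line[1])
--             min[line[0]] = int(line[1])
--             continue
--         if int(line[1]) > max[line[0]]:
--             max[line[0]] = int(line[1])
--         if int(line[1]) < min[line[0]]:
--             min[line[0]] = int(line[1])
--     return zip(min.keys(), max.values(), min.values())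
-- ===== SOURCE B (Python) =====
-- def mapper05(sequence: list):
--     groups: dict = {}
--     for line in sequence:
--         groups.setdefault(line[0], []).append(int(line[1]))
--     return zip(groups.keys(),
--                (max(v) for v in groups.values()),
--                (min(v) for v in groups.values()))
-- ===== Notes on version B (the rewrite author's own statement) =====
-- stated objective: simpler
-- what changed: Instead of tracking running min/max in two parallel dicts with branch-per-line updates, B groups all values per key into lists in one setdefault loop and reduces each group with the builtin max/min at the end.
import Mathlib
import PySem

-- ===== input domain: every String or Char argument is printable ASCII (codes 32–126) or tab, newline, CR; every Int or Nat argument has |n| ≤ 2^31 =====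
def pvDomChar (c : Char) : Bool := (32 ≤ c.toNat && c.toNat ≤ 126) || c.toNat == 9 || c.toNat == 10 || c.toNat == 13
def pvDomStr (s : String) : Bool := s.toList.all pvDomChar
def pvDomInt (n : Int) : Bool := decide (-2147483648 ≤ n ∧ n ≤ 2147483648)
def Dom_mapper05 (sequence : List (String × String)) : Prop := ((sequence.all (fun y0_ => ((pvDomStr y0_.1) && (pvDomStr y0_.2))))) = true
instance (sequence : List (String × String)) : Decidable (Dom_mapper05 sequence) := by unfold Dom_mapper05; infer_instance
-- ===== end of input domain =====

-- ===== PORT A =====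
-- A keeps two running dicts (min, max) updated per line; B (below) groups values per key and reduces.
-- Ports are about the RETURN value; 'int(line[1])' raising ValueError is excluded by Pre_mapper05.
def pvAStep (st : PySem.Dict String Int × PySem.Dict String Int) (line : String × String) :
    PySem.Dict String Int × PySem.Dict String Int :=
  let v : Int := (PySem.Int.ofStr? line.2).getD 0
  if (!(st.1.contains line.1)) || (!(st.2.contains line.1)) then
    (st.1.insert line.1 v, st.2.insert line.1 v)
  else
    (if v < st.1.getD line.1 0 then st.1.insert line.1 v else st.1,
     if st.2.getD line.1 0 < v then st.2.insert line.1 v else st.2)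

def mapper05 (sequence : List (String × String)) : List (String × Int × Int) :=
  let st := sequence.foldl pvAStep (PySem.Dict.empty, PySem.Dict.empty)
  st.1.keys.zip (st.2.values.zip st.1.values)

-- ===== PORT B =====
-- groups.setdefault(line[0], []).append(int(line[1]))  ==  modify line.1 [] (· ++ [v])
def pvBStep (d : PySem.Dict String (List Int)) (line : String × String) :
    PySem.Dict String (List Int) :=
  d.modify line.1 [] (· ++ [(PySem.Int.ofStr? line.2).getD 0])

def mapper05_alt (sequence : List (String × String)) : List (String × Int × Int) :=
  let groups := sequence.foldl pvBStep PySem.Dict.empty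
  groups.keys.zip
    ((groups.values.map (fun v => (PySem.List.max? v id).getD 0)).zip
     (groups.values.map (fun v => (PySem.List.min? v id).getD 0)))

-- ===== PRECONDITION & SPEC =====
-- Pre_ excludes exactly the inputs where A's int(line[1]) raises ValueError (a value string not parseable as an int).
-- pvDigits cs = "cs is a nonempty run of digits 0-9 with single '_' separators between digits" (Python int-literal body)
def pvDigits : List Char → Bool
  | [] => false
  | [c] => c.isDigit
  | c :: '_' :: rest => c.isDigit && pvDigits rest
  | c :: rest => c.isDigit && pvDigits rest

-- pvIntLike s = "int(s) succeeds": optional whitespace around an optional sign and a digit run (exact on the ASCII domain)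
def pvIntLike (s : String) : Bool :=
  match ((s.toList.dropWhile Char.isWhitespace).reverse.dropWhile Char.isWhitespace).reverse with
  | '+' :: rest => pvDigits rest
  | '-' :: rest => pvDigits rest
  | rest => pvDigits rest

def Pre_mapper05 (sequence : List (String × String)) : Prop :=
  ∀ p ∈ sequence, pvIntLike p.2 = true
instance (sequence : List (String × String)) : Decidable (Pre_mapper05 sequence) := by
  unfold Pre_mapper05; infer_instance
def pvWitness_mapper05 : (List (String × String)) := [("a", "3"), ("b", "-1"), ("a", "7")]

def Spec_mapper05 (sequence : List (String × String)) (out : List (String × Int × Int)) : Prop := out = mapper05_alt sequence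
instance (sequence : List (String × String)) (out : List (String × Int × Int)) : Decidable (Spec_mapper05 sequence out) := by unfold Spec_mapper05; infer_instance

-- ===== CLAIM (what is proved, stated in full; the proofs are below) =====
def Claim_equal_mapper05 : Prop := ∀ (sequence : List (String × String)), Dom_mapper05 sequence → Pre_mapper05 sequence → Spec_mapper05 sequence (mapper05 sequence)

-- ===== LEMMAS AND PROOFS =====

/-- value the min-dict of A holds for a group list -/
def mval (l : List Int) : Int := (PySem.List.min? l id).getD 0
/-- value the max-dict of A holds for a group list -/
def xval (l : List Int) : Int := (PySem.List.max? l id).getD 0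

/-- map a per-key reduction over a group dict -/
def liftD (f : List Int → Int) (d : PySem.Dict String (List Int)) : PySem.Dict String Int :=
  PySem.Dict.mk (d.items.map (fun p => (p.1, f p.2)))

lemma contains_liftD (f : List Int → Int) (d : PySem.Dict String (List Int)) (k : String) :
    (liftD f d).contains k = d.contains k := by
  simp [liftD, PySem.Dict.contains, List.any_map, Function.comp_def]

lemma get?_liftD (f : List Int → Int) (d : PySem.Dict String (List Int)) (k : String) :
    (liftD f d).get? k = (d.get? k).map f := by
  simp [liftD, PySem.Dict.get?, List.find?_map, Function.comp_def, Option.map_map]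

lemma min?_append_singleton (l : List Int) (v m : Int) (h : PySem.List.min? l id = some m) :
    PySem.List.min? (l ++ [v]) id = some (if v < m then v else m) := by
  simp [PySem.List.min?] at h ⊢
  rw [h]
  by_cases hv : v < m <;> simp [hv]

lemma max?_append_singleton (l : List Int) (v m : Int) (h : PySem.List.max? l id = some m) :
    PySem.List.max? (l ++ [v]) id = some (if m < v then v else m) := by
  simp [PySem.List.max?] at h ⊢
  rw [h]
  by_cases hv : m < v <;> simp [hv]

lemma min?_cons_cons (x y : Int) (t : List Int) :
    PySem.List.min? (x :: y :: t) id = PySem.List.min? ((if y < x then y else x) :: t) id := by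
  by_cases h : y < x <;> simp [PySem.List.min?, h]

lemma max?_cons_cons (x y : Int) (t : List Int) :
    PySem.List.max? (x :: y :: t) id = PySem.List.max? ((if x < y then y else x) :: t) id := by
  by_cases h : x < y <;> simp [PySem.List.max?, h]

lemma min?_isSome_cons (r : List Int) : ∀ (x : Int), (PySem.List.min? (x :: r) id).isSome = true := by
  induction r with
  | nil => intro x; rfl
  | cons y t ih => intro x; rw [min?_cons_cons]; exact ih _

lemma max?_isSome_cons (r : List Int) : ∀ (x : Int), (PySem.List.max? (x :: r) id).isSome = true := by
  induction r with
  | nil => intro x; rfl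
  | cons y t ih => intro x; rw [max?_cons_cons]; exact ih _

lemma min?_isSome_of_ne_nil (l : List Int) (h : l ≠ []) :
    (PySem.List.min? l id).isSome = true := by
  cases l with
  | nil => exact absurd rfl h
  | cons x r => exact min?_isSome_cons r x

lemma max?_isSome_of_ne_nil (l : List Int) (h : l ≠ []) :
    (PySem.List.max? l id).isSome = true := by
  cases l with
  | nil => exact absurd rfl h
  | cons x r => exact max?_isSome_cons r x

/-- with Nodup keys, any member whose key is the looked-up key carries the found value -/
lemma mem_key_eq_get? (d : PySem.Dict String (List Int)) (k : String) (l₁ : List Int)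
    (hnd : (d.items.map Prod.fst).Nodup) (hg : d.get? k = some l₁) :
    ∀ p ∈ d.items, p.1 = k → p.2 = l₁ := by
  intro p hp hpk
  simp only [PySem.Dict.get?, Option.map_eq_some_iff] at hg
  obtain ⟨q, hq, hq2⟩ := hg
  have hqmem := List.mem_of_find?_eq_some hq
  have hqk : q.1 = k := by
    have := List.find?_some hq
    simpa using this
  have : p = q := by
    have hinj := List.inj_on_of_nodup_map hnd
    exact hinj hp hqmem (by rw [hpk, hqk])
  rw [this, hq2]

lemma contains_iff_get?_isSome (d : PySem.Dict String (List Int)) (k : String) :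
    d.contains k = (d.get? k).isSome := by
  simp only [PySem.Dict.contains, PySem.Dict.get?]
  cases hf : d.items.find? (fun p => p.1 == k) with
  | none =>
    have h1 := List.find?_eq_none.mp hf
    simp only [Option.map_none, Option.isSome_none, List.any_eq_false]
    intro x hx
    simpa using h1 x hx
  | some q =>
    simp only [Option.map_some, Option.isSome_some, List.any_eq_true]
    exact ⟨q, List.mem_of_find?_eq_some hf, List.find?_some (p := fun (p : String × List Int) => p.1 == k) hf⟩


lemma get?_some_mem (d : PySem.Dict String (List Int)) (k : String) (l₁ : List Int)
    (hg : d.get? k = some l₁) : ∃ p ∈ d.items, p.1 = k ∧ p.2 = l₁ := by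
  simp only [PySem.Dict.get?, Option.map_eq_some_iff] at hg
  obtain ⟨q, hq, hq2⟩ := hg
  exact ⟨q, List.mem_of_find?_eq_some hq,
    by simpa using List.find?_some (p := fun (p : String × List Int) => p.1 == k) hq, hq2⟩

lemma min_component (d : PySem.Dict String (List Int)) (k : String) (v : Int)
    (l₁ : List Int) (m : Int)
    (hnd : (d.items.map Prod.fst).Nodup)
    (hc : d.contains k = true) (hg : d.get? k = some l₁)
    (hm : PySem.List.min? l₁ id = some m) :
    (if v < m then (liftD mval d).insert k v else liftD mval d) =
      liftD mval (d.insert k (l₁ ++ [v])) := by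
  have hkey := mem_key_eq_get? d k l₁ hnd hg
  have hcl : (liftD mval d).contains k = true := by rw [contains_liftD]; exact hc
  have hmapp : mval (l₁ ++ [v]) = if v < m then v else m := by
    simp [mval, min?_append_singleton l₁ v m hm]
  have hmval : mval l₁ = m := by simp [mval, hm]
  have hca : ((d.items.map (fun p => (p.1, mval p.2))).any fun p => p.1 == k) = true := by
    simpa [liftD, PySem.Dict.contains] using hcl
  apply PySem.Dict.ext
  by_cases hv : v < m
  · simp only [if_pos hv]
    simp [PySem.Dict.insert, hca, hc, liftD, List.map_map]
    intro a b hab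
    by_cases hk : a = k
    · simp [hk, hmapp, hv]
    · simp [hk]
  · simp only [if_neg hv]
    simp [PySem.Dict.insert, hc, liftD, List.map_map]
    intro a b hab
    by_cases hk : a = k
    · have h2 := hkey (a, b) hab hk
      simp only [] at h2
      simp [hk, hmapp, hv, h2, hmval]
    · simp [hk]


lemma max_component (d : PySem.Dict String (List Int)) (k : String) (v : Int)
    (l₁ : List Int) (M : Int)
    (hnd : (d.items.map Prod.fst).Nodup)
    (hc : d.contains k = true) (hg : d.get? k = some l₁)
    (hM : PySem.List.max? l₁ id = some M) :
    (if M < v then (liftD xval d).insert k v else liftD xval d) =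
      liftD xval (d.insert k (l₁ ++ [v])) := by
  have hkey := mem_key_eq_get? d k l₁ hnd hg
  have hcl : (liftD xval d).contains k = true := by rw [contains_liftD]; exact hc
  have hxapp : xval (l₁ ++ [v]) = if M < v then v else M := by
    simp [xval, max?_append_singleton l₁ v M hM]
  have hxval : xval l₁ = M := by simp [xval, hM]
  have hca : ((d.items.map (fun p => (p.1, xval p.2))).any fun p => p.1 == k) = true := by
    simpa [liftD, PySem.Dict.contains] using hcl
  apply PySem.Dict.ext
  by_cases hv : M < v
  · simp only [if_pos hv]
    simp [PySem.Dict.insert, hca, hc, liftD, List.map_map]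
    intro a b hab
    by_cases hk : a = k
    · simp [hk, hxapp, hv]
    · simp [hk]
  · simp only [if_neg hv]
    simp [PySem.Dict.insert, hc, liftD, List.map_map]
    intro a b hab
    by_cases hk : a = k
    · have h2 := hkey (a, b) hab hk
      simp only [] at h2
      simp [hk, hxapp, hv, h2, hxval]
    · simp [hk]


/-- one line of A's loop is one line of B's loop, through the per-key reductions -/
lemma step_eq (d : PySem.Dict String (List Int)) (line : String × String)
    (hnd : (d.items.map Prod.fst).Nodup) (hne : ∀ p ∈ d.items, p.2 ≠ []) :
    pvAStep (liftD mval d, liftD xval d) line =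
      (liftD mval (pvBStep d line), liftD xval (pvBStep d line)) := by
  by_cases hc : d.contains line.1
  · -- key already present: A updates via comparisons, B appends to the group
    have hs : (d.get? line.1).isSome = true := by rw [← contains_iff_get?_isSome]; exact hc
    obtain ⟨l₁, hg⟩ := Option.isSome_iff_exists.mp hs
    obtain ⟨p₀, hp₀, hp₀k, hp₀v⟩ := get?_some_mem d line.1 l₁ hg
    have hl₁ : l₁ ≠ [] := hp₀v ▸ hne p₀ hp₀
    obtain ⟨m, hm⟩ := Option.isSome_iff_exists.mp (min?_isSome_of_ne_nil l₁ hl₁)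
    obtain ⟨M, hM⟩ := Option.isSome_iff_exists.mp (max?_isSome_of_ne_nil l₁ hl₁)
    have hgetD : d.getD line.1 [] = l₁ := by simp [PySem.Dict.getD, hg]
    have hmin : (liftD mval d).getD line.1 0 = m := by
      simp [PySem.Dict.getD, get?_liftD, hg, mval, hm]
    have hmax : (liftD xval d).getD line.1 0 = M := by
      simp [PySem.Dict.getD, get?_liftD, hg, xval, hM]
    have hcm : (liftD mval d).contains line.1 = true := by rw [contains_liftD]; exact hc
    have hcx : (liftD xval d).contains line.1 = true := by rw [contains_liftD]; exact hc
    simp only [pvAStep, pvBStep, PySem.Dict.modify, hcm, hcx, hgetD, hmin, hmax,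
      Bool.not_true, Bool.or_self, Bool.false_eq_true, if_false, Prod.mk.injEq]
    exact ⟨min_component d line.1 _ l₁ m hnd hc hg hm,
           max_component d line.1 _ l₁ M hnd hc hg hM⟩
  · -- fresh key: both sides append a new entry
    have hg : d.get? line.1 = none := by
      cases hq : d.get? line.1 with
      | none => rfl
      | some l => exact absurd (by rw [contains_iff_get?_isSome, hq]; rfl) hc
    have hcf : (d.items.any fun p => p.1 == line.1) = false :=
      Bool.eq_false_iff.mpr (fun h => hc h)
    simp [pvAStep, pvBStep, PySem.Dict.modify, PySem.Dict.insert, PySem.Dict.contains,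
      List.any_map, Function.comp_def, hcf, PySem.Dict.getD, hg, liftD, mval, xval,
      PySem.List.min?, PySem.List.max?]

lemma step_nodup (d : PySem.Dict String (List Int)) (line : String × String)
    (hnd : (d.items.map Prod.fst).Nodup) :
    ((pvBStep d line).items.map Prod.fst).Nodup := by
  simp only [pvBStep, PySem.Dict.modify, PySem.Dict.insert]
  by_cases hc : d.contains line.1
  · rw [if_pos hc]
    simp only [List.map_map]
    have heq : d.items.map (Prod.fst ∘ (fun p =>
        if p.1 == line.1 then (line.1, d.getD line.1 [] ++ [(PySem.Int.ofStr? line.2).getD 0]) else p)) =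
        d.items.map Prod.fst := by
      apply List.map_congr_left
      intro p _
      by_cases hk : p.1 = line.1 <;> simp [hk]
    rw [heq]
    exact hnd
  · rw [if_neg hc]
    simp only [List.map_append, List.map_cons, List.map_nil]
    refine List.Nodup.append hnd (List.nodup_singleton _) ?_
    intro a ha hb
    simp only [List.mem_singleton] at hb
    subst hb
    simp only [List.mem_map] at ha
    obtain ⟨p, hp, hpk⟩ := ha
    have hcf : (d.items.any fun p => p.1 == line.1) = false :=
      Bool.eq_false_iff.mpr (fun h => hc h)
    have := (List.any_eq_false (l := d.items)).mp hcf p hp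
    simp [hpk] at this

lemma step_ne_nil (d : PySem.Dict String (List Int)) (line : String × String)
    (hne : ∀ p ∈ d.items, p.2 ≠ []) :
    ∀ p ∈ (pvBStep d line).items, p.2 ≠ [] := by
  intro p hp
  simp only [pvBStep, PySem.Dict.modify, PySem.Dict.insert] at hp
  split at hp
  · simp only [List.mem_map] at hp
    obtain ⟨q, hq, rfl⟩ := hp
    by_cases hk : (q.1 == line.1) = true
    · simp [hk]
    · rw [if_neg hk]
      exact hne q hq
  · simp only [List.mem_append, List.mem_singleton] at hp
    rcases hp with hp | hp
    · exact hne p hp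
    · subst hp; simp

lemma loop_eq (l : List (String × String)) (d : PySem.Dict String (List Int))
    (hnd : (d.items.map Prod.fst).Nodup) (hne : ∀ p ∈ d.items, p.2 ≠ []) :
    l.foldl pvAStep (liftD mval d, liftD xval d) =
      (liftD mval (l.foldl pvBStep d), liftD xval (l.foldl pvBStep d)) := by
  induction l generalizing d with
  | nil => rfl
  | cons x t ih =>
    simp only [List.foldl_cons]
    rw [step_eq d x hnd hne]
    exact ih (pvBStep d x) (step_nodup d x hnd) (step_ne_nil d x hne)

-- ===== VERDICT (by name: the statement is the Claim_ definition above) =====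
theorem mapper05_spec : Claim_equal_mapper05 := by
  intro sequence _ _
  show mapper05 sequence = mapper05_alt sequence
  have h := loop_eq sequence PySem.Dict.empty (by simp [PySem.Dict.empty]) (by simp [PySem.Dict.empty])
  simp only [mapper05, mapper05_alt]
  rw [show (PySem.Dict.empty, PySem.Dict.empty) =
        ((liftD mval PySem.Dict.empty, liftD xval PySem.Dict.empty) :
          PySem.Dict String Int × PySem.Dict String Int) from rfl, h]
  simp [liftD, PySem.Dict.keys, PySem.Dict.values, List.map_map, Function.comp_def, mval, xval]
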